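-- pv_equiv track=rewrite | github.com/svgbogdnn/algorithms-data-structures-IDAS_course- | 3 term/[CONTEST] 3 'ИСАД АиСД-1 2526. ДЗ 2. Хеш-функции'/7.py | longliveDrizzy
-- ===== SOURCE A (Python) =====
-- def longliveDrizzy(s):
--     n = len(s)
--     if n == 0:
--         return 0
--     pi = [0] * n
--     i = 1
--     while i < n:
--         j = pi[i - 1]
--         while j > 0 and s[i] != s[j]:
--             j = pi[j - 1]
--         if s[i] == s[j]:
--             j = j + 1
--         pi[i] = j
--         i = i + 1
--     p = n - pi[n - 1]
--     if p == 0: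
--         p = n
--     return p
-- ===== SOURCE B (Python) =====
-- def longliveDrizzy(s):
--     n = len(s)
--     if n == 0:
--         return 0
--     p = 1
--     while s[p:] != s[:n - p]:
--         p += 1
--     return p
-- ===== Notes on version B (the rewrite author's own statement) =====
-- stated objective: simpler
-- what changed: Replaces the KMP prefix-function computation with a direct search for the smallest shift p such that s[p:] == s[:n-p], returning the first p that works (p == n always does).
import Mathlib
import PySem

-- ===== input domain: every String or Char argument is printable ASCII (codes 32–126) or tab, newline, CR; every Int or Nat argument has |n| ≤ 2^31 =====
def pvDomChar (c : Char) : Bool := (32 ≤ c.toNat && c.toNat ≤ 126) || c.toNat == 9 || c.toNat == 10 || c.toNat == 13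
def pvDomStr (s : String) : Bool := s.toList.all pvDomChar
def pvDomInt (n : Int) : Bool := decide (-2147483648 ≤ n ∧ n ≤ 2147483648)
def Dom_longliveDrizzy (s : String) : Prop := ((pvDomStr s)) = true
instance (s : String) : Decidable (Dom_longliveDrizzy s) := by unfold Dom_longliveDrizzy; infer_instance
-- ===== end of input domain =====

-- B replaces A's KMP prefix-function computation by a direct search for the smallest
-- shift p with s[i]==s[i-p] for all i in [p,n) (objective: simpler).

-- ===== PORT A =====
-- inner `while j > 0 and s[i] != s[j]: j = pi[j-1]`; the fuel argument only bounds the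
-- iteration count (it is started at the initial j, which suffices since j strictly decreases)
def pvJloop (l : List Char) (pi : List Nat) (i : Nat) : Nat → Nat → Nat
  | j, 0 => j
  | j, f+1 =>
    if 0 < j ∧ ¬ (l.getD i '?' = l.getD j '?') then
      pvJloop l pi i (pi.getD (j-1) 0) f
    else j

-- outer `while i < n` loop; fuel bounds the trip count (started at n, and n - i ≤ n)
def pvOuter (l : List Char) (n : Nat) : List Nat → Nat → Nat → List Nat
  | pi, _, 0 => pi
  | pi, i, f+1 =>
    if i < n then
      let j0 := pi.getD (i-1) 0
      let j1 := pvJloop l pi i j0 j0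
      let j2 := if l.getD i '?' = l.getD j1 '?' then j1 + 1 else j1
      pvOuter l n (pi.set i j2) (i+1) f
    else pi

def longliveDrizzy (s : String) : Int :=
  let l := s.toList
  let n := l.length
  if n = 0 then 0
  else
    let pi := pvOuter l n (List.replicate n 0) 1 n
    let p := n - pi.getD (n-1) 0
    let p' := if p = 0 then n else p
    (p' : Int)

-- ===== PORT B =====
-- the slice test `s[p:] != s[:n - p]` (negated: here true means the slices are equal)
def pvIsPeriod (l : List Char) (n p : Nat) : Bool :=
  l.drop p == l.take (n - p)

-- `while s[p:] != s[:n-p]: p += 1`; fuel (started at n) only bounds the trip count: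
-- p = n always passes the test, so at most n - 1 increments happen
def pvFindP (l : List Char) (n : Nat) : Nat → Nat → Nat
  | p, 0 => p
  | p, f+1 => if pvIsPeriod l n p then p else pvFindP l n (p+1) f

def longliveDrizzy_alt (s : String) : Int :=
  let l := s.toList
  let n := l.length
  if n = 0 then 0 else (pvFindP l n 1 n : Int)

-- ===== PRECONDITION & SPEC =====
def Spec_longliveDrizzy (s : String) (out : Int) : Prop := out = longliveDrizzy_alt s
instance (s : String) (out : Int) : Decidable (Spec_longliveDrizzy s out) := by unfold Spec_longliveDrizzy; infer_instance

-- ===== CLAIM (what is proved, stated in full; the proofs are below) =====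
def Claim_equal_longliveDrizzy : Prop := ∀ (s : String), Dom_longliveDrizzy s → Spec_longliveDrizzy s (longliveDrizzy s)

-- ===== LEMMAS AND PROOFS =====

-- `pvChk l m k = true` iff the prefix of length k of l equals the suffix of length k
-- of l's prefix of length m (a "border" check, expressed pointwise through getD)
def pvChk (l : List Char) (m k : Nat) : Bool :=
  (List.range k).all (fun t => l.getD t '?' == l.getD (m - k + t) '?')

-- largest j ≤ k with P j, else 0
def pvDown (P : Nat → Bool) : Nat → Nat
  | 0 => 0
  | k+1 => if P (k+1) then k+1 else pvDown P k

-- length of the longest proper border of l's prefix of length m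
def pvMaxB (l : List Char) (m : Nat) : Nat := pvDown (pvChk l m) (m - 1)

-- k is a proper border of l's prefix of length m
def pvBd (l : List Char) (m k : Nat) : Prop := k < m ∧ pvChk l m k = true

lemma chk_iff (l : List Char) (m k : Nat) :
    pvChk l m k = true ↔ ∀ t, t < k → l.getD t '?' = l.getD (m - k + t) '?' := by
  simp [pvChk, List.all_eq_true, List.mem_range]

lemma chk_zero (l : List Char) (m : Nat) : pvChk l m 0 = true := by
  simp [pvChk]

lemma down_le (P : Nat → Bool) (k : Nat) : pvDown P k ≤ k := by
  induction k with
  | zero => simp [pvDown]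
  | succ k ih => simp only [pvDown]; split <;> omega

lemma down_prop (P : Nat → Bool) (h0 : P 0 = true) (k : Nat) : P (pvDown P k) = true := by
  induction k with
  | zero => simpa [pvDown]
  | succ k ih => simp only [pvDown]; split <;> simp_all

lemma down_ge (P : Nat → Bool) (k j : Nat) (hj : j ≤ k) (hP : P j = true) :
    j ≤ pvDown P k := by
  induction k with
  | zero => omega
  | succ k ih =>
    simp only [pvDown]; split
    · omega
    · rcases Nat.lt_or_ge j (k+1) with h | h
      · exact ih (by omega)
      · have : j = k+1 := by omega
        simp_all

lemma chk_trans (l : List Char) {m j k : Nat} (hk : k ≤ j) (hj : j ≤ m)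
    (h1 : pvChk l m j = true) (h2 : pvChk l j k = true) : pvChk l m k = true := by
  rw [chk_iff] at *
  intro t ht
  have e2 := h2 t ht
  have e1 := h1 (j - k + t) (by omega)
  have : m - j + (j - k + t) = m - k + t := by omega
  rw [this] at e1
  exact e2.trans e1

lemma chk_restrict (l : List Char) {m j k : Nat} (hk : k ≤ j) (hj : j ≤ m)
    (h1 : pvChk l m j = true) (h2 : pvChk l m k = true) : pvChk l j k = true := by
  rw [chk_iff] at *
  intro t ht
  have e2 := h2 t ht
  have e1 := h1 (j - k + t) (by omega)
  have : m - j + (j - k + t) = m - k + t := by omega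
  rw [this] at e1
  exact e2.trans e1.symm

lemma chk_succ (l : List Char) {i k : Nat} (hk : k ≤ i) :
    pvChk l (i+1) (k+1) = true ↔
      (pvChk l i k = true ∧ l.getD k '?' = l.getD i '?') := by
  rw [chk_iff, chk_iff]
  constructor
  · intro h
    refine ⟨fun t ht => ?_, ?_⟩
    · have := h t (by omega)
      have e : i + 1 - (k+1) + t = i - k + t := by omega
      rwa [e] at this
    · have := h k (by omega)
      have e : i + 1 - (k+1) + k = i := by omega
      rwa [e] at this
  · rintro ⟨h1, h2⟩ t ht
    rcases Nat.lt_or_ge t k with h | h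
    · have := h1 t h
      have e : i + 1 - (k+1) + t = i - k + t := by omega
      rwa [e]
    · have e : i + 1 - (k+1) + t = i := by omega
      rw [e]
      have ht' : t = k := by omega
      rw [ht']
      exact h2

-- the inner-loop specification
lemma jloop_spec (l : List Char) (pi : List Nat) (i : Nat) (_hi : 1 ≤ i)
    (hpi : ∀ t, t < i → pi.getD t 0 = pvMaxB l (t+1)) :
    ∀ f j, j ≤ f → pvBd l i j →
      (∀ k, pvBd l i k → l.getD k '?' = l.getD i '?' → k ≤ j) →
      pvBd l i (pvJloop l pi i j f) ∧
      (l.getD (pvJloop l pi i j f) '?' = l.getD i '?' ∨ pvJloop l pi i j f = 0) ∧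
      (∀ k, pvBd l i k → l.getD k '?' = l.getD i '?' → k ≤ pvJloop l pi i j f) := by
  intro f
  induction f with
  | zero =>
    intro j hjf hbd hmax
    have : j = 0 := by omega
    subst this
    exact ⟨hbd, Or.inr rfl, hmax⟩
  | succ f ih =>
    intro j hjf hbd hmax
    by_cases hc : 0 < j ∧ ¬ (l.getD i '?' = l.getD j '?')
    · rw [pvJloop, if_pos hc]
      obtain ⟨hj0, hne⟩ := hc
      have hji : j < i := hbd.1
      have hpij : pi.getD (j-1) 0 = pvMaxB l j := by
        have := hpi (j-1) (by omega)
        rwa [Nat.sub_add_cancel hj0] at this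
      rw [hpij]
      set j' := pvMaxB l j with hj'
      have hj'le : j' ≤ j - 1 := down_le _ _
      have hchkj' : pvChk l j j' = true := down_prop _ (chk_zero l j) _
      have hbd' : pvBd l i j' := by
        refine ⟨by omega, ?_⟩
        exact chk_trans l (by omega) (by omega) hbd.2 hchkj'
      have hmax' : ∀ k, pvBd l i k → l.getD k '?' = l.getD i '?' → k ≤ j' := by
        intro k hk hg
        have hkj : k ≤ j := hmax k hk hg
        have hkne : k ≠ j := by
          intro h; subst h; exact hne hg.symm
        have hkltj : k < j := by omega
        have : pvChk l j k = true := chk_restrict l (by omega) (by omega) hbd.2 hk.2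
        exact down_ge _ _ _ (by omega) this
      exact ih j' (by omega) hbd' hmax'
    · rw [pvJloop, if_neg hc]
      refine ⟨hbd, ?_, hmax⟩
      by_cases hj0 : j = 0
      · exact Or.inr hj0
      · left
        have : l.getD i '?' = l.getD j '?' := by
          by_contra h; exact hc ⟨by omega, h⟩
        exact this.symm

-- one outer-loop step computes the longest proper border of the next prefix
lemma step_spec (l : List Char) (pi : List Nat) (i : Nat) (hi : 1 ≤ i)
    (hpi : ∀ t, t < i → pi.getD t 0 = pvMaxB l (t+1)) :
    (if l.getD i '?' = l.getD (pvJloop l pi i (pi.getD (i-1) 0) (pi.getD (i-1) 0)) '?'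
     then pvJloop l pi i (pi.getD (i-1) 0) (pi.getD (i-1) 0) + 1
     else pvJloop l pi i (pi.getD (i-1) 0) (pi.getD (i-1) 0)) = pvMaxB l (i+1) := by
  have hj0 : pi.getD (i-1) 0 = pvMaxB l i := by
    have := hpi (i-1) (by omega)
    rwa [Nat.sub_add_cancel hi] at this
  set j0 := pi.getD (i-1) 0 with hj0def
  have hj0le : j0 ≤ i - 1 := by rw [hj0]; exact down_le _ _
  have hbd0 : pvBd l i j0 := by
    refine ⟨by omega, ?_⟩
    rw [hj0]; exact down_prop _ (chk_zero l i) _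
  have hmax0 : ∀ k, pvBd l i k → l.getD k '?' = l.getD i '?' → k ≤ j0 := by
    intro k hk _
    rw [hj0]
    have hki : k < i := hk.1
    exact down_ge _ _ _ (by omega) hk.2
  obtain ⟨hbdf, hgf, hmaxf⟩ := jloop_spec l pi i hi hpi j0 j0 le_rfl hbd0 hmax0
  set jf := pvJloop l pi i j0 j0 with hjf
  have hjfi : jf < i := hbdf.1
  have hM : pvMaxB l (i+1) = pvDown (pvChk l (i+1)) i := by
    have e : (i+1) - 1 = i := by omega
    rw [pvMaxB, e]
  have hMle : pvMaxB l (i+1) ≤ i := by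
    rw [hM]; exact down_le _ _
  have hMchk : pvChk l (i+1) (pvMaxB l (i+1)) = true := down_prop _ (chk_zero l (i+1)) _
  by_cases hg : l.getD i '?' = l.getD jf '?'
  · rw [if_pos hg]
    have hsucc : pvChk l (i+1) (jf+1) = true :=
      (chk_succ l (by omega)).2 ⟨hbdf.2, hg.symm⟩
    have h1 : jf + 1 ≤ pvMaxB l (i+1) := by
      rw [hM]
      exact down_ge _ _ _ (by omega) hsucc
    have h2 : pvMaxB l (i+1) ≤ jf + 1 := by
      rcases Nat.eq_zero_or_pos (pvMaxB l (i+1)) with h | h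
      · omega
      · obtain ⟨k, hk⟩ := Nat.exists_eq_succ_of_ne_zero (by omega : pvMaxB l (i+1) ≠ 0)
        rw [hk] at hMchk hMle
        obtain ⟨hck, hgk⟩ := (chk_succ l (by omega : k ≤ i)).1 hMchk
        have : k ≤ jf := hmaxf k ⟨by omega, hck⟩ hgk
        omega
    omega
  · rw [if_neg hg]
    have hjf0 : jf = 0 := by
      rcases hgf with h | h
      · exact absurd h.symm hg
      · exact h
    rcases Nat.eq_zero_or_pos (pvMaxB l (i+1)) with h | h
    · omega
    · exfalso
      obtain ⟨k, hk⟩ := Nat.exists_eq_succ_of_ne_zero (by omega : pvMaxB l (i+1) ≠ 0)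
      rw [hk] at hMchk hMle
      obtain ⟨hck, hgk⟩ := (chk_succ l (by omega : k ≤ i)).1 hMchk
      have hkjf : k ≤ jf := hmaxf k ⟨by omega, hck⟩ hgk
      rw [hjf0] at hkjf
      have : k = 0 := by omega
      subst this
      rw [hjf0] at hg
      exact hg hgk.symm

-- the outer loop fills pi with the longest-border values
lemma outer_spec (l : List Char) (n : Nat) :
    ∀ f i pi, 1 ≤ i → i ≤ n → n - i ≤ f → pi.length = n →
      (∀ t, t < i → pi.getD t 0 = pvMaxB l (t+1)) →
      ∀ t, t < n → (pvOuter l n pi i f).getD t 0 = pvMaxB l (t+1) := by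
  intro f
  induction f with
  | zero =>
    intro i pi h1 h2 h3 hlen hpi t ht
    have : i = n := by omega
    subst this
    exact hpi t ht
  | succ f ih =>
    intro i pi h1 h2 h3 hlen hpi t ht
    by_cases hc : i < n
    · rw [pvOuter, if_pos hc]
      have hlen' : (pi.set i (if l.getD i '?' = l.getD (pvJloop l pi i (pi.getD (i-1) 0) (pi.getD (i-1) 0)) '?'
          then pvJloop l pi i (pi.getD (i-1) 0) (pi.getD (i-1) 0) + 1
          else pvJloop l pi i (pi.getD (i-1) 0) (pi.getD (i-1) 0))).length = n := by
        simpa using hlen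
      have hpi' : ∀ t', t' < i + 1 →
          (pi.set i (if l.getD i '?' = l.getD (pvJloop l pi i (pi.getD (i-1) 0) (pi.getD (i-1) 0)) '?'
          then pvJloop l pi i (pi.getD (i-1) 0) (pi.getD (i-1) 0) + 1
          else pvJloop l pi i (pi.getD (i-1) 0) (pi.getD (i-1) 0))).getD t' 0 = pvMaxB l (t'+1) := by
        intro t' ht'
        rcases Nat.lt_or_ge t' i with h | h
        · rw [List.getD_eq_getElem?_getD, List.getElem?_set_ne (by omega),
              ← List.getD_eq_getElem?_getD]
          exact hpi t' h
        · have het : i = t' := by omega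
          subst het
          rw [List.getD_eq_getElem?_getD, List.getElem?_set_self (by omega),
              Option.getD_some]
          exact step_spec l pi i h1 hpi
      exact ih (i+1) _ (by omega) (by omega) (by omega) hlen' hpi' t ht
    · rw [pvOuter, if_neg hc]
      exact hpi t (by omega)

-- the naive slice test agrees with the border check
lemma isPeriod_iff (l : List Char) (n p : Nat) (hp : p ≤ n) (hn : n = l.length) :
    pvIsPeriod l n p = true ↔ pvChk l n (n - p) = true := by
  rw [chk_iff]
  rw [pvIsPeriod, beq_iff_eq]
  constructor
  · intro h t ht
    have hpt : p + t < l.length := by omega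
    have htl : t < l.length := by omega
    have hdt : t < (l.drop p).length := by simp; omega
    have e := congrArg (fun xs => xs[t]?) h
    simp only [List.getElem?_drop] at e
    rw [List.getElem?_take_of_lt (by omega), List.getElem?_eq_getElem hpt,
        List.getElem?_eq_getElem htl] at e
    have e' : l[p + t] = l[t] := by simpa using e
    have g1 : l.getD t '?' = l[t] := List.getD_eq_getElem l '?' htl
    have g2 : l.getD (n - (n - p) + t) '?' = l[p + t] := by
      have eidx : n - (n - p) + t = p + t := by omega
      rw [eidx]
      exact List.getD_eq_getElem l '?' hpt
    rw [g1, g2, e']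
  · intro h
    apply List.ext_getElem
    · simp; omega
    · intro t h1 h2
      have ht : t < n - p := by simp at h1; omega
      have hpt : p + t < l.length := by omega
      have htl : t < l.length := by omega
      have e := h t ht
      have eidx : n - (n - p) + t = p + t := by omega
      rw [eidx] at e
      rw [List.getD_eq_getElem l '?' htl, List.getD_eq_getElem l '?' hpt] at e
      simp only [List.getElem_drop, List.getElem_take]
      exact e.symm

lemma findP_spec (l : List Char) (n : Nat) :
    ∀ f p q, p ≤ q → q - p ≤ f →
      (∀ r, p ≤ r → r < q → pvIsPeriod l n r = false) →
      pvIsPeriod l n q = true → pvFindP l n p f = q := by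
  intro f
  induction f with
  | zero =>
    intro p q h1 h2 _ _
    have : p = q := by omega
    subst this
    rfl
  | succ f ih =>
    intro p q h1 h2 hfalse htrue
    by_cases hpq : p = q
    · subst hpq
      rw [pvFindP, if_pos htrue]
    · have hplt : p < q := by omega
      have : pvIsPeriod l n p = false := hfalse p le_rfl hplt
      rw [pvFindP, if_neg (by simp [this])]
      exact ih (p+1) q (by omega) (by omega) (fun r hr hr' => hfalse r (by omega) hr') htrue

-- ===== VERDICT (by name: the statement is the Claim_ definition above) =====
theorem longliveDrizzy_spec : Claim_equal_longliveDrizzy := by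
  intro s _
  unfold Spec_longliveDrizzy longliveDrizzy longliveDrizzy_alt
  set l := s.toList with hl
  by_cases h0 : l.length = 0
  · rw [if_pos h0, if_pos h0]
  · rw [if_neg h0, if_neg h0]
    dsimp only
    have hn1 : 1 ≤ l.length := Nat.pos_of_ne_zero h0
    have hpi : (pvOuter l l.length (List.replicate l.length 0) 1 l.length).getD (l.length - 1) 0
        = pvMaxB l l.length := by
      have hinit : ∀ t, t < 1 → (List.replicate l.length 0).getD t 0 = pvMaxB l (t+1) := by
        intro t ht
        have : t = 0 := by omega
        subst this
        rw [List.getD_eq_getElem?_getD, List.getElem?_replicate_of_lt (by omega), Option.getD_some]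
        rw [pvMaxB]
        rfl
      have := outer_spec l l.length l.length 1 (List.replicate l.length 0) le_rfl hn1 (by omega)
        (by simp) hinit (l.length - 1) (by omega)
      rwa [Nat.sub_add_cancel hn1] at this
    rw [hpi]
    have hMle : pvMaxB l l.length ≤ l.length - 1 := down_le _ _
    have hne : ¬ (l.length - pvMaxB l l.length = 0) := by omega
    rw [if_neg hne]
    have hB : pvFindP l l.length 1 l.length = l.length - pvMaxB l l.length := by
      apply findP_spec l l.length l.length 1 _ (by omega) (by omega)
      · intro r hr hrq
        cases hh : pvIsPeriod l l.length r with
        | false => rfl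
        | true =>
          exfalso
          have hchk := (isPeriod_iff l l.length r (by omega) rfl).1 hh
          have hle : l.length - r ≤ pvMaxB l l.length := down_ge _ _ _ (by omega) hchk
          omega
      · rw [isPeriod_iff l l.length _ (by omega) rfl]
        have e : l.length - (l.length - pvMaxB l l.length) = pvMaxB l l.length := by omega
        rw [e]
        exact down_prop _ (chk_zero l l.length) _
    rw [hB]
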